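-- pv_equiv track=rewrite | github.com/MatheusPercine/TEP | lista2/C/c1.py | find_relative_ananagrams
-- ===== SOURCE A (Python) =====
-- def find_relative_ananagrams(words):
--     from collections import defaultdict
--
--     def normalize(word):
--         return ''.join(sorted(word.lower()))
--
--     anagram_groups = defaultdict(list)
--
--     for word in words:
--         norm = normalize(word)
--         anagram_groups[norm].append(word)
--
--     result = set()
--     for norm, group in anagram_groups.items():
--         if len(group) == 1:
--             result.add(group[0])
--
--     return sorted(result)
-- ===== SOURCE B (Python) =====
-- def find_relative_ananagrams(words):
--     # Sort (signature, word) pairs by signature, then scan adjacent runs: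
--     # a run of length 1 means the signature is unique, so emit its word.
--     pairs = sorted(((''.join(sorted(w.lower())), w) for w in words), key=lambda p: p[0])
--     result = []
--     i, n = 0, len(pairs)
--     while i < n:
--         j = i
--         while j < n and pairs[j][0] == pairs[i][0]:
--             j += 1
--         if j == i + 1:
--             result.append(pairs[i][1])
--         i = j
--     return sorted(result)
-- ===== Notes on version B (the rewrite author's own statement) =====
-- stated objective: alternative
-- what changed: B uses no dictionary at all: it sorts the (signature, word) pairs by signature and scans adjacent runs with two indices, emitting the word of each length-1 run, then sorts the emitted words; A groups words into a defaultdict of lists and scans the groups.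
import Mathlib
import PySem

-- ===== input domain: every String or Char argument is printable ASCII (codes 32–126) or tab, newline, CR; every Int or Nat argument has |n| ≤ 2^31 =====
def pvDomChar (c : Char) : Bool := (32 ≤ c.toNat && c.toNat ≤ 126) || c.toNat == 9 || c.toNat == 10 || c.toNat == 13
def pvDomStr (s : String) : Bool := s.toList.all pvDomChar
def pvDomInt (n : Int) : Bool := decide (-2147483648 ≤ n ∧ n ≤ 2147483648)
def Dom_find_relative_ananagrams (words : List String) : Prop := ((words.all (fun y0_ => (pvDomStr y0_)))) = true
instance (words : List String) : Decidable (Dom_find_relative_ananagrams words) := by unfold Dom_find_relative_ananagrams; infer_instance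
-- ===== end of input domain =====

-- B replaces A's defaultdict of word lists by a dictionary-free sort-and-scan: it sorts the
-- (signature, word) pairs by signature and emits the word of every adjacent run of length 1
-- (objective: alternative algorithm; same asymptotic cost).

-- ===== PORT A =====
-- shared helper: normalize(word) = ''.join(sorted(word.lower())) — the join of the single-char
-- strings produced by sorted() is exactly the string of the sorted char list
def pvSig (w : String) : String :=
  String.ofList (PySem.List.sorted (PySem.Str.lower w).toList (fun c => c) false)

def find_relative_ananagrams (words : List String) : List String :=
  let anagram_groups :=
    words.foldl (fun d w => d.modify (pvSig w) [] (fun g => g ++ [w]))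
      (PySem.Dict.empty : PySem.Dict String (List String))
  let result :=
    anagram_groups.items.foldl
      (fun r p => if p.2.length = 1 then PySem.Set.add r (PySem.List.pyGetD p.2 0 "") else r)
      (PySem.Set.empty : PySem.Set String)
  PySem.List.sorted result (fun x => x) false

-- ===== PORT B =====
-- the outer while loop over run starts: the inner 'while pairs[j][0] == pairs[i][0]' is the
-- takeWhile/dropWhile split of the tail at the current signature; 'j == i + 1' is 'run part of
-- the tail is empty'
def pvScan : List (String × String) → List String
  | [] => []
  | p :: rest =>
    if rest.takeWhile (fun q => q.1 == p.1) = [] then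
      p.2 :: pvScan (rest.dropWhile (fun q => q.1 == p.1))
    else
      pvScan (rest.dropWhile (fun q => q.1 == p.1))
termination_by l => l.length
decreasing_by
  all_goals
    exact Nat.lt_succ_of_le (List.Sublist.length_le (List.dropWhile_sublist _))

def find_relative_ananagrams_alt (words : List String) : List String :=
  let pairs := PySem.List.sorted (words.map (fun w => (pvSig w, w))) (fun p => p.1) false
  PySem.List.sorted (pvScan pairs) (fun x => x) false

-- ===== PRECONDITION & SPEC =====
def Spec_find_relative_ananagrams (words : List String) (out : List String) : Prop := out = find_relative_ananagrams_alt words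
instance (words : List String) (out : List String) : Decidable (Spec_find_relative_ananagrams words out) := by unfold Spec_find_relative_ananagrams; infer_instance

-- ===== CLAIM (what is proved, stated in full; the proofs are below) =====
def Claim_equal_find_relative_ananagrams : Prop := ∀ (words : List String), Dom_find_relative_ananagrams words → Spec_find_relative_ananagrams words (find_relative_ananagrams words)

-- ===== LEMMAS AND PROOFS =====

-- ---- A side: membership in the result set ↔ x ∈ words and x's signature occurs once ----

lemma mem_foldl_if_add (l : List (String × List String)) (s : PySem.Set String) (x : String) :
    x ∈ l.foldl (fun r p => if p.2.length = 1 then PySem.Set.add r (PySem.List.pyGetD p.2 0 "") else r) s ↔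
      x ∈ s ∨ ∃ p ∈ l, p.2.length = 1 ∧ x = PySem.List.pyGetD p.2 0 "" := by
  induction l generalizing s with
  | nil => simp
  | cons a t ih =>
    simp only [List.foldl_cons, ih]
    by_cases h : a.2.length = 1
    · simp [h, PySem.Set.mem_add]
      tauto
    · simp [h]

lemma nodup_foldl_if_add (l : List (String × List String)) (s : PySem.Set String) (hs : s.Nodup) :
    (l.foldl (fun r p => if p.2.length = 1 then PySem.Set.add r (PySem.List.pyGetD p.2 0 "") else r) s).Nodup := by
  induction l generalizing s with
  | nil => exact hs
  | cons a t ih =>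
    simp only [List.foldl_cons]
    split
    · exact ih _ (PySem.Set.nodup_add _ _ hs)
    · exact ih _ hs

lemma groups_getD (words : List String) (k : String) :
    (words.foldl (fun d w => d.modify (pvSig w) [] (fun g => g ++ [w]))
      (PySem.Dict.empty : PySem.Dict String (List String))).getD k []
      = words.filter (fun w => pvSig w == k) := by
  have h := PySem.Dict.getD_foldl_modify_append
      (l := words.map (fun w => (pvSig w, w)))
      (d := (PySem.Dict.empty : PySem.Dict String (List String))) (c := k)
  rw [List.foldl_map] at h
  rw [h]
  simp [List.filter_map, Function.comp_def]

lemma pyGetD_singleton {α : Type} (a d : α) : PySem.List.pyGetD [a] 0 d = a := rfl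

lemma count_sig (words : List String) (k : String) :
    (words.map pvSig).count k = (words.filter (fun w => pvSig w == k)).length := by
  rw [List.count_eq_countP, List.countP_map, List.countP_eq_length_filter]
  rfl

lemma groups_keys (words : List String) :
    (words.foldl (fun d w => d.modify (pvSig w) [] (fun g => g ++ [w]))
      (PySem.Dict.empty : PySem.Dict String (List String))).keys
      = PySem.Set.ofList (words.map pvSig) := by
  have h := PySem.Dict.keys_foldl_modify_key
      (l := words) (key := pvSig) (d0 := ([] : List String))
      (f := fun _ w g => g ++ [w]) (d := (PySem.Dict.empty : PySem.Dict String (List String)))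
  simpa [PySem.Dict.keys_empty, PySem.Set.update_nil_left] using h

lemma memA (words : List String) (x : String) :
    (x ∈ (words.foldl (fun d w => d.modify (pvSig w) [] (fun g => g ++ [w]))
          (PySem.Dict.empty : PySem.Dict String (List String))).items.foldl
          (fun r p => if p.2.length = 1 then PySem.Set.add r (PySem.List.pyGetD p.2 0 "") else r)
          (PySem.Set.empty : PySem.Set String)) ↔
      ∃ k ∈ words.map pvSig,
        (words.filter (fun w => pvSig w == k)).length = 1 ∧
        x = PySem.List.pyGetD (words.filter (fun w => pvSig w == k)) 0 "" := by
  rw [mem_foldl_if_add,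
    PySem.Dict.items_eq_map_keys _ (PySem.Dict.nodup_keys_foldl_modify_key words pvSig []
      (fun _ w g => g ++ [w]) PySem.Dict.empty PySem.Dict.nodup_keys_empty) [],
    groups_keys]
  simp [groups_getD, PySem.Set.mem_ofList, PySem.Set.empty]

lemma pyGetD_filter_of_mem (words : List String) (k x : String)
    (hx : x ∈ words.filter (fun w => pvSig w == k))
    (hlen : (words.filter (fun w => pvSig w == k)).length = 1) :
    PySem.List.pyGetD (words.filter (fun w => pvSig w == k)) 0 "" = x := by
  obtain ⟨a, ha⟩ := List.length_eq_one_iff.mp hlen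
  rw [ha] at hx ⊢
  simpa [pyGetD_singleton] using (List.mem_singleton.mp hx).symm

-- A's result set, characterised
lemma memA' (words : List String) (x : String) :
    (x ∈ (words.foldl (fun d w => d.modify (pvSig w) [] (fun g => g ++ [w]))
          (PySem.Dict.empty : PySem.Dict String (List String))).items.foldl
          (fun r p => if p.2.length = 1 then PySem.Set.add r (PySem.List.pyGetD p.2 0 "") else r)
          (PySem.Set.empty : PySem.Set String)) ↔
      x ∈ words ∧ (words.map pvSig).count (pvSig x) = 1 := by
  rw [memA]
  constructor
  · rintro ⟨k, _, hlen, rfl⟩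
    obtain ⟨a, ha⟩ := List.length_eq_one_iff.mp hlen
    have hx : a ∈ words.filter (fun w => pvSig w == k) := by
      rw [ha]; exact List.mem_singleton_self a
    have hget : PySem.List.pyGetD (words.filter (fun w => pvSig w == k)) 0 "" = a :=
      pyGetD_filter_of_mem words k a hx hlen
    rw [List.mem_filter] at hx
    obtain ⟨haw, hsig⟩ := hx
    have hk : pvSig a = k := by simpa using hsig
    rw [hget]
    refine ⟨haw, ?_⟩
    rw [count_sig, hk, hlen]
  · rintro ⟨hw, hc⟩
    rw [count_sig] at hc
    refine ⟨pvSig x, List.mem_map_of_mem hw, hc, ?_⟩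
    exact (pyGetD_filter_of_mem words (pvSig x) x
      (List.mem_filter.mpr ⟨hw, by simp⟩) hc).symm

-- ---- B side: the run scan over a signature-sorted pair list ----

-- every element of the tail dropped past the head's run has a strictly larger signature
lemma sig_gt_of_mem_dropWhile (p : String × String) (rest : List (String × String))
    (hs : (p :: rest).Pairwise (fun a b => a.1 ≤ b.1)) :
    ∀ q ∈ rest.dropWhile (fun q => q.1 == p.1), p.1 < q.1 := by
  intro q hq
  rcases List.pairwise_cons.mp hs with ⟨hle, hrest⟩
  have hmem : q ∈ rest := List.Sublist.mem hq (List.dropWhile_sublist _)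
  have hle' : p.1 ≤ q.1 := hle q hmem
  rcases hd : rest.dropWhile (fun q => q.1 == p.1) with _ | ⟨a, t⟩
  · rw [hd] at hq; simp at hq
  · rw [hd] at hq
    have hane : ¬ (a.1 == p.1) = true := by
      have := List.head?_dropWhile_not (p := fun q => q.1 == p.1) (l := rest)
      rw [hd] at this; exact ne_true_of_eq_false this
    have hane' : a.1 ≠ p.1 := by simpa using hane
    have hpa : p.1 ≤ a.1 := hle a (List.Sublist.mem (by rw [hd]; exact List.mem_cons_self) (List.dropWhile_sublist _))
    have hpa' : p.1 < a.1 := lt_of_le_of_ne hpa (Ne.symm hane')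
    rcases List.mem_cons.mp hq with rfl | hq'
    · exact hpa'
    · have hsub : (a :: t).Pairwise (fun a b => a.1 ≤ b.1) := by
        have := List.Pairwise.sublist (List.dropWhile_sublist (p := fun q => q.1 == p.1)) hrest
        rwa [hd] at this
      have : a.1 ≤ q.1 := (List.pairwise_cons.mp hsub).1 q hq'
      exact lt_of_lt_of_le hpa' this

-- countP of a signature strictly above the head's run is unchanged by dropping the run
lemma countP_dropWhile_of_gt (p : String × String) (rest : List (String × String)) (s : String)
    (hne : s ≠ p.1) :
    (p :: rest).countP (fun q => q.1 == s)
      = (rest.dropWhile (fun q => q.1 == p.1)).countP (fun q => q.1 == s) := by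
  have hsplit : rest = rest.takeWhile (fun q => q.1 == p.1) ++ rest.dropWhile (fun q => q.1 == p.1) :=
    (List.takeWhile_append_dropWhile).symm
  rw [List.countP_cons]
  have hp : ¬ (p.1 == s) = true := by simpa using fun h => hne h.symm
  conv_lhs => rw [hsplit]
  rw [List.countP_append]
  have htake : (rest.takeWhile (fun q => q.1 == p.1)).countP (fun q => q.1 == s) = 0 := by
    rw [List.countP_eq_zero]
    intro a ha
    have h1 := List.mem_takeWhile_imp ha
    have h2 : a.1 = p.1 := by simpa using h1
    simpa [h2] using fun h => hne h.symm
  simp [htake, hp]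

-- when the head's run is a singleton, no later element shares its signature
lemma countP_head_singleton (p : String × String) (rest : List (String × String))
    (hs : (p :: rest).Pairwise (fun a b => a.1 ≤ b.1))
    (ht : rest.takeWhile (fun q => q.1 == p.1) = []) :
    (p :: rest).countP (fun q => q.1 == p.1) = 1 := by
  have hdrop : rest.dropWhile (fun q => q.1 == p.1) = rest := by
    have := (List.takeWhile_append_dropWhile (p := fun q => q.1 == p.1) (l := rest))
    rw [ht] at this; simpa using this
  have hall : ∀ q ∈ rest, ¬ (q.1 == p.1) = true := by
    intro q hq
    have := sig_gt_of_mem_dropWhile p rest hs q (by rwa [hdrop])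
    simp only [beq_iff_eq]
    exact fun h => absurd h (ne_of_gt this)
  rw [List.countP_cons]
  simp [List.countP_eq_zero.mpr hall]

-- characterisation of the run scan on a signature-sorted list
lemma mem_pvScan (l : List (String × String)) (hs : l.Pairwise (fun a b => a.1 ≤ b.1)) (x : String) :
    x ∈ pvScan l ↔ ∃ p ∈ l, p.2 = x ∧ l.countP (fun q => q.1 == p.1) = 1 := by
  induction l using pvScan.induct with
  | case1 => simp [pvScan]
  | case2 p rest ht ih =>
    rw [pvScan, if_pos ht]
    have hdrop : rest.dropWhile (fun q => q.1 == p.1) = rest := by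
      have := (List.takeWhile_append_dropWhile (p := fun q => q.1 == p.1) (l := rest))
      rw [ht] at this; simpa using this
    have hrest : rest.Pairwise (fun a b => a.1 ≤ b.1) := (List.pairwise_cons.mp hs).2
    rw [hdrop] at ih ⊢
    rw [List.mem_cons, ih hrest]
    constructor
    · rintro (rfl | ⟨q, hq, rfl, hc⟩)
      · exact ⟨p, List.mem_cons_self, rfl, countP_head_singleton p rest hs ht⟩
      · refine ⟨q, List.mem_cons_of_mem _ hq, rfl, ?_⟩
        have hgt := sig_gt_of_mem_dropWhile p rest hs q (by rwa [hdrop])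
        rw [countP_dropWhile_of_gt p rest q.1 (ne_of_gt hgt), hdrop]
        exact hc
    · rintro ⟨q, hq, rfl, hc⟩
      rcases List.mem_cons.mp hq with rfl | hq'
      · left; rfl
      · right
        by_cases hqs : q.1 = p.1
        · exfalso
          have hgt := sig_gt_of_mem_dropWhile p rest hs q (by rwa [hdrop])
          exact absurd hqs (ne_of_gt hgt)
        · refine ⟨q, hq', rfl, ?_⟩
          rw [← hdrop, ← countP_dropWhile_of_gt p rest q.1 hqs]
          exact hc
  | case3 p rest ht ih =>
    rw [pvScan, if_neg ht]
    have hrest : rest.Pairwise (fun a b => a.1 ≤ b.1) := (List.pairwise_cons.mp hs).2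
    have hsd : (rest.dropWhile (fun q => q.1 == p.1)).Pairwise (fun a b => a.1 ≤ b.1) :=
      List.Pairwise.sublist (List.dropWhile_sublist _) hrest
    rw [ih hsd]
    constructor
    · rintro ⟨q, hq, rfl, hc⟩
      have hgt := sig_gt_of_mem_dropWhile p rest hs q hq
      refine ⟨q, List.mem_cons_of_mem _ (List.Sublist.mem hq (List.dropWhile_sublist _)), rfl, ?_⟩
      rw [countP_dropWhile_of_gt p rest q.1 (ne_of_gt hgt)]
      exact hc
    · rintro ⟨q, hq, rfl, hc⟩
      -- the head's run has ≥ 2 elements, so any q with count 1 lies past the run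
      rcases hd : rest.takeWhile (fun q => q.1 == p.1) with _ | ⟨a, t⟩
      · exact absurd hd ht
      have ha0 : a ∈ rest.takeWhile (fun q => q.1 == p.1) := by rw [hd]; exact List.mem_cons_self
      have ha : (a.1 == p.1) = true := by simpa using List.mem_takeWhile_imp ha0
      have hamem : a ∈ rest := List.Sublist.mem (by rw [hd]; exact List.mem_cons_self)
        (List.takeWhile_sublist _)
      have hc2 : 2 ≤ (p :: rest).countP (fun q => q.1 == p.1) := by
        rw [List.countP_cons]
        simp only [beq_self_eq_true, if_pos]
        have : 0 < rest.countP (fun q => q.1 == p.1) :=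
          List.countP_pos_iff.mpr ⟨a, hamem, ha⟩
        omega
      have hqne : q.1 ≠ p.1 := by
        intro h
        rw [h] at hc
        omega
      have hqmem : q ∈ rest := by
        rcases List.mem_cons.mp hq with rfl | h
        · exact absurd rfl hqne
        · exact h
      -- q is past the run: q ∈ dropWhile
      have hqd : q ∈ rest.dropWhile (fun q => q.1 == p.1) := by
        have hsplit : rest = rest.takeWhile (fun q => q.1 == p.1) ++ rest.dropWhile (fun q => q.1 == p.1) :=
          (List.takeWhile_append_dropWhile).symm
        rw [hsplit] at hqmem
        rcases List.mem_append.mp hqmem with h | h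
        · exact absurd (by simpa using List.mem_takeWhile_imp h) hqne
        · exact h
      refine ⟨q, hqd, rfl, ?_⟩
      rw [← countP_dropWhile_of_gt p rest q.1 hqne]
      exact hc

-- the run scan of a sorted list of (pvSig w, w) pairs has no duplicates
lemma nodup_pvScan (l : List (String × String)) (hs : l.Pairwise (fun a b => a.1 ≤ b.1))
    (hsig : ∀ p ∈ l, p.1 = pvSig p.2) : (pvScan l).Nodup := by
  induction l using pvScan.induct with
  | case1 => simp [pvScan]
  | case2 p rest ht ih =>
    rw [pvScan, if_pos ht]
    have hdrop : rest.dropWhile (fun q => q.1 == p.1) = rest := by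
      have := (List.takeWhile_append_dropWhile (p := fun q => q.1 == p.1) (l := rest))
      rw [ht] at this; simpa using this
    have hrest : rest.Pairwise (fun a b => a.1 ≤ b.1) := (List.pairwise_cons.mp hs).2
    rw [hdrop] at ih ⊢
    refine List.nodup_cons.mpr ⟨?_, ih hrest (fun q hq => hsig q (List.mem_cons_of_mem _ hq))⟩
    intro hmem
    obtain ⟨q, hq, hq2, _⟩ := (mem_pvScan rest hrest p.2).mp hmem
    have hgt := sig_gt_of_mem_dropWhile p rest hs q (by rwa [hdrop])
    have h1 : q.1 = pvSig q.2 := hsig q (List.mem_cons_of_mem _ hq)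
    have h2 : p.1 = pvSig p.2 := hsig p List.mem_cons_self
    rw [h1, hq2, ← h2] at hgt
    exact absurd rfl (ne_of_gt hgt)
  | case3 p rest ht ih =>
    rw [pvScan, if_neg ht]
    have hrest : rest.Pairwise (fun a b => a.1 ≤ b.1) := (List.pairwise_cons.mp hs).2
    exact ih (List.Pairwise.sublist (List.dropWhile_sublist _) hrest)
      (fun q hq => hsig q (List.mem_cons_of_mem _ (List.Sublist.mem hq (List.dropWhile_sublist _))))

-- B's emitted words, characterised over the original input
lemma memB (words : List String) (x : String) :
    x ∈ pvScan (PySem.List.sorted (words.map (fun w => (pvSig w, w))) (fun p => p.1) false) ↔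
      x ∈ words ∧ (words.map pvSig).count (pvSig x) = 1 := by
  set l := PySem.List.sorted (words.map (fun w => (pvSig w, w))) (fun p => p.1) false with hl
  have hperm : l.Perm (words.map (fun w => (pvSig w, w))) := PySem.List.sorted_perm _ _ _
  have hs : l.Pairwise (fun a b => a.1 ≤ b.1) := PySem.List.sorted_pairwise _ _
  have hcnt : ∀ s : String, l.countP (fun q => q.1 == s) = (words.map pvSig).count s := by
    intro s
    rw [hperm.countP_eq, List.countP_map, List.count_eq_countP, List.countP_map]
    rfl
  rw [mem_pvScan l hs x]
  constructor
  · rintro ⟨p, hp, rfl, hc⟩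
    have hp' : p ∈ words.map (fun w => (pvSig w, w)) := hperm.mem_iff.mp hp
    obtain ⟨w, hw, hpe⟩ := List.mem_map.mp hp'
    rw [hcnt] at hc
    refine ⟨by rw [← hpe]; exact hw, ?_⟩
    have : p.1 = pvSig p.2 := by rw [← hpe]
    rwa [← this]
  · rintro ⟨hw, hc⟩
    refine ⟨(pvSig x, x), hperm.mem_iff.mpr (List.mem_map_of_mem hw), rfl, ?_⟩
    rw [hcnt]
    exact hc

-- ===== VERDICT (by name: the statement is the Claim_ definition above) =====
theorem find_relative_ananagrams_spec : Claim_equal_find_relative_ananagrams := by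
  intro words _
  unfold Spec_find_relative_ananagrams find_relative_ananagrams find_relative_ananagrams_alt
  apply PySem.List.sorted_eq_sorted_of_perm _ _ _ (fun a b h => h)
  have hs : (PySem.List.sorted (words.map (fun w => (pvSig w, w))) (fun p => p.1) false).Pairwise
      (fun a b => a.1 ≤ b.1) := PySem.List.sorted_pairwise _ _
  have hsig : ∀ p ∈ PySem.List.sorted (words.map (fun w => (pvSig w, w))) (fun p => p.1) false,
      p.1 = pvSig p.2 := by
    intro p hp
    have := (PySem.List.sorted_perm (words.map (fun w => (pvSig w, w))) (fun p => p.1) false).mem_iff.mp hp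
    obtain ⟨w, _, hpe⟩ := List.mem_map.mp this
    rw [← hpe]
  refine (List.perm_ext_iff_of_nodup
    (nodup_foldl_if_add _ _ List.nodup_nil) (nodup_pvScan _ hs hsig)).mpr ?_
  intro x
  exact (memA' words x).trans (memB words x).symm
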